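-- pv_equiv track=rewrite | github.com/francod2004/unify-crm | enrichment_agent.py | _is_dead_end_email
-- ===== SOURCE A (Python) =====
-- DEAD_END_EMAILS = ["noreply@", "no-reply@", "donotreply@", "do-not-reply@"]
--
-- DEAD_END_DOMAINS = {
--     "canpages.ca", "foodpages.ca", "yellowpages.ca", "yp.ca", "411.ca",
--     "findopen.ca", "findopenhours.com", "cylex-canada.ca",
--     "yelp.com", "yelp.ca", "bbb.org",
--     "facebook.com", "instagram.com", "twitter.com", "x.com", "linkedin.com",
--     "google.com",
-- }
--
-- def _is_dead_end_email(email):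
--     e = (email or "").strip().lower()
--     if not e or "@" not in e:
--         return False
--     if any(e.startswith(p) for p in DEAD_END_EMAILS):
--         return True
--     domain = e.split("@", 1)[1]
--     if any(domain == d or domain.endswith("." + d) for d in DEAD_END_DOMAINS):
--         return True
--     return False
-- ===== SOURCE B (Python) =====
-- DEAD_END_EMAILS = ["noreply@", "no-reply@", "donotreply@", "do-not-reply@"]
--
-- DEAD_END_DOMAINS = {
--     "canpages.ca", "foodpages.ca", "yellowpages.ca", "yp.ca", "411.ca",
--     "findopen.ca", "findopenhours.com", "cylex-canada.ca",
--     "yelp.com", "yelp.ca", "bbb.org",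
--     "facebook.com", "instagram.com", "twitter.com", "x.com", "linkedin.com",
--     "google.com",
-- }
--
-- # the local parts of DEAD_END_EMAILS (each prefix is "<local>@")
-- DEAD_END_LOCALS = {"noreply", "no-reply", "donotreply", "do-not-reply"}
--
--
-- def _is_dead_end_email(email):
--     e = (email or "").strip().lower()
--     if not e or "@" not in e:
--         return False
--     local, domain = e.split("@", 1)
--     if local in DEAD_END_LOCALS:
--         return True
--     labels = domain.split(".")
--     for i in range(len(labels)):
--         if ".".join(labels[i:]) in DEAD_END_DOMAINS:
--             return True
--     return False
-- ===== Notes on version B (the rewrite author's own statement) =====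
-- stated objective: alternative
-- what changed: Instead of scanning every blocklist entry (startswith for each of the 4 prefixes, equality/endswith for each of the 17 domains), B splits the address once at the first at-sign, looks the local part up in a set, and enumerates only the input domain's own dot-suffixes, looking each up in the domain set.
import Mathlib
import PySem

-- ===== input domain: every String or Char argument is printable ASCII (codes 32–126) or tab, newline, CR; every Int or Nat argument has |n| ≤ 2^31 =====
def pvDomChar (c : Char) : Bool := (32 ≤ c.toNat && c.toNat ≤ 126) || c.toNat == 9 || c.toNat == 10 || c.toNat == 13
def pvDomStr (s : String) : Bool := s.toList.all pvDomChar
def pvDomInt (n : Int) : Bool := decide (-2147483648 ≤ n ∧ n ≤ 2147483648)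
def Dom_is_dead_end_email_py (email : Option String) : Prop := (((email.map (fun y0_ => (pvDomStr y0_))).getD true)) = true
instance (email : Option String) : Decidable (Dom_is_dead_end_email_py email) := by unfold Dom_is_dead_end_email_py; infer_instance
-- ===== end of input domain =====

-- B replaces A's scan over every blocklist entry (startswith per prefix, endswith per domain)
-- by one split of the e-mail: the local part is looked up in a set, and only the input domain's
-- own dot-suffixes are enumerated and looked up in the domain set (objective: alternative).

def pvDeadEndEmails : List String := ["noreply@", "no-reply@", "donotreply@", "do-not-reply@"]

def pvDeadEndDomainsList : List String :=
  ["canpages.ca", "foodpages.ca", "yellowpages.ca", "yp.ca", "411.ca",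
   "findopen.ca", "findopenhours.com", "cylex-canada.ca",
   "yelp.com", "yelp.ca", "bbb.org",
   "facebook.com", "instagram.com", "twitter.com", "x.com", "linkedin.com",
   "google.com"]

def pvDeadEndDomains : PySem.Set String := PySem.Set.ofList pvDeadEndDomainsList

-- ===== PORT A =====
def is_dead_end_email_py (email : Option String) : Bool :=
  let e := PySem.Str.lower (PySem.Str.strip (email.getD ""))
  if e == "" || !(PySem.Str.isIn "@" e) then false
  else if pvDeadEndEmails.any (fun p => PySem.Str.startswith e p) then true
  else
    match (PySem.Str.splitMax? e "@" 1).bind (fun parts => PySem.List.pyGet? parts 1) with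
    | none => false  -- unreachable: "@" is a non-empty separator and "@" ∈ e gives ≥ 2 parts
    | some domain =>
      if pvDeadEndDomains.any (fun d =>
           domain == d || PySem.Str.endswith domain ("." ++ d)) then true
      else false

-- ===== PORT B =====
-- the local parts of DEAD_END_EMAILS (each prefix is "<local>@")
def pvDeadEndLocals : PySem.Set String :=
  PySem.Set.ofList ["noreply", "no-reply", "donotreply", "do-not-reply"]

def is_dead_end_email_py_alt (email : Option String) : Bool :=
  let e := PySem.Str.lower (PySem.Str.strip (email.getD ""))
  if e == "" || !(PySem.Str.isIn "@" e) then false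
  else
    match PySem.Str.splitMax? e "@" 1 with
    | some [localPart, domain] =>
      if PySem.Set.contains pvDeadEndLocals localPart then true
      else
        match PySem.Str.split? domain "." with
        | some labels =>
          (List.range labels.length).any (fun i =>
            PySem.Set.contains pvDeadEndDomains (PySem.Str.join "." (labels.drop i)))
        | none => false  -- unreachable: "." is a non-empty separator
    | _ => false  -- unreachable: "@" ∈ e gives exactly 2 parts with maxsplit 1

-- ===== PRECONDITION & SPEC =====
def Spec_is_dead_end_email_py (email : Option String) (out : Bool) : Prop := out = is_dead_end_email_py_alt email
instance (email : Option String) (out : Bool) : Decidable (Spec_is_dead_end_email_py email out) := by unfold Spec_is_dead_end_email_py; infer_instance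

-- ===== CLAIM (what is proved, stated in full; the proofs are below) =====
def Claim_equal_is_dead_end_email_py : Prop := ∀ (email : Option String), Dom_is_dead_end_email_py email → Spec_is_dead_end_email_py email (is_dead_end_email_py email)

-- ===== LEMMAS AND PROOFS =====

/-- prepend `p` to the first piece -/
def consPre (p : List Char) : List (List Char) → List (List Char)
  | [] => [p]
  | h :: t => (p ++ h) :: t

/-- structural spec of Python's `s.split(c)` for a single-char separator -/
def splitAll (c : Char) : List Char → List (List Char)
  | [] => [[]]
  | x :: r => if x = c then [] :: splitAll c r else consPre [x] (splitAll c r)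

/-- structural spec of Python's `s.split(c, 1)` for a single-char separator -/
def split1At (c : Char) : List Char → List (List Char)
  | [] => [[]]
  | x :: r => if x = c then [[], r] else consPre [x] (split1At c r)

theorem splitAll_ne_nil (c : Char) (s : List Char) : splitAll c s ≠ [] := by
  cases s with
  | nil => simp [splitAll]
  | cons x r =>
    simp only [splitAll]
    split
    · simp
    · cases h : splitAll c r <;> simp [consPre]

theorem split1At_ne_nil (c : Char) (s : List Char) : split1At c s ≠ [] := by
  cases s with
  | nil => simp [split1At]
  | cons x r =>
    simp only [split1At]
    split
    · simp
    · cases h : split1At c r <;> simp [consPre]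

theorem consPre_consPre (p q : List Char) (L : List (List Char)) :
    consPre p (consPre q L) = consPre (p ++ q) L := by
  cases L <;> simp [consPre]

theorem goAll_eq (c : Char) : ∀ (fuel : Nat) (l cur : List Char) (acc : List (List Char)),
    l.length ≤ fuel →
    PySem.Chars.splitOn.go [c] fuel l cur acc = acc.reverse ++ consPre cur.reverse (splitAll c l) := by
  intro fuel
  induction fuel with
  | zero =>
    intro l cur acc hl
    have : l = [] := by cases l <;> simp_all
    subst this
    simp [PySem.Chars.splitOn.go, splitAll, consPre]
  | succ n ih =>
    intro l cur acc hl
    cases l with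
    | nil => simp [PySem.Chars.splitOn.go, splitAll, consPre]
    | cons x rest =>
      rw [PySem.Chars.splitOn.go]
      by_cases hxc : x = c
      · subst hxc
        have hpre : [x].isPrefixOf (x :: rest) = true := by simp [List.isPrefixOf]
        rw [if_pos hpre]
        simp only [List.length_cons] at hl
        rw [ih _ _ _ (by simpa using Nat.lt_succ_iff.mp (Nat.lt_of_lt_of_le (Nat.lt_succ_self _) hl))]
        · obtain ⟨h, t, ht⟩ : ∃ h t, splitAll x rest = h :: t := by
            cases hs : splitAll x rest with
            | nil => exact absurd hs (splitAll_ne_nil x rest)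
            | cons h t => exact ⟨h, t, rfl⟩
          simp [splitAll, consPre, ht]
      · have hpre : [c].isPrefixOf (x :: rest) = false := by
          simp [List.isPrefixOf]
          exact fun h => absurd h.symm hxc
        rw [if_neg (by simp [hpre])]
        simp only [List.length_cons] at hl
        rw [ih _ _ _ (Nat.lt_succ_iff.mp (Nat.lt_of_lt_of_le (Nat.lt_succ_self _) (by omega)))]
        simp [splitAll, if_neg hxc, consPre_consPre]

theorem goMax0_eq (c : Char) : ∀ (fuel : Nat) (l cur : List Char) (acc : List (List Char)),
    PySem.Chars.splitOnMax.go [c] fuel 0 l cur acc = acc.reverse ++ [cur.reverse ++ l] := by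
  intro fuel l cur acc
  cases fuel with
  | zero => simp [PySem.Chars.splitOnMax.go]
  | succ n =>
    cases l with
    | nil => simp [PySem.Chars.splitOnMax.go]
    | cons x rest => rw [PySem.Chars.splitOnMax.go]; simp

theorem goMax1_eq (c : Char) : ∀ (fuel : Nat) (l cur : List Char) (acc : List (List Char)),
    l.length ≤ fuel →
    PySem.Chars.splitOnMax.go [c] fuel 1 l cur acc = acc.reverse ++ consPre cur.reverse (split1At c l) := by
  intro fuel
  induction fuel with
  | zero =>
    intro l cur acc hl
    have : l = [] := by cases l <;> simp_all
    subst this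
    simp [PySem.Chars.splitOnMax.go, split1At, consPre]
  | succ n ih =>
    intro l cur acc hl
    cases l with
    | nil => simp [PySem.Chars.splitOnMax.go, split1At, consPre]
    | cons x rest =>
      rw [PySem.Chars.splitOnMax.go]
      by_cases hxc : x = c
      · subst hxc
        have hpre : [x].isPrefixOf (x :: rest) = true := by simp [List.isPrefixOf]
        simp only [if_neg (by decide : ¬ (1 : Nat) = 0), hpre, if_pos]
        simp only [List.length_singleton, List.drop_succ_cons, List.drop_zero]
        rw [goMax0_eq]
        simp [split1At, consPre]
      · have hpre : [c].isPrefixOf (x :: rest) = false := by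
          simp [List.isPrefixOf]
          exact fun h => absurd h.symm hxc
        rw [if_neg (by decide : ¬ (1 : Nat) = 0), if_neg (by simp [hpre])]
        simp only [List.length_cons] at hl
        rw [ih _ _ _ (by omega)]
        simp [split1At, if_neg hxc, consPre_consPre]

theorem splitOn_single (c : Char) (s : List Char) :
    PySem.Chars.splitOn s [c] = splitAll c s := by
  unfold PySem.Chars.splitOn
  rw [goAll_eq c (s.length + 1) s [] [] (by omega)]
  obtain ⟨h, t, ht⟩ : ∃ h t, splitAll c s = h :: t := by
    cases hs : splitAll c s with
    | nil => exact absurd hs (splitAll_ne_nil c s)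
    | cons h t => exact ⟨h, t, rfl⟩
  simp [ht, consPre]

theorem splitOnMax1_single (c : Char) (s : List Char) :
    PySem.Chars.splitOnMax s [c] 1 = split1At c s := by
  unfold PySem.Chars.splitOnMax
  rw [if_neg (by decide)]
  simp only [Int.toNat_one]
  rw [goMax1_eq c (s.length + 1) s [] [] (by omega)]
  obtain ⟨h, t, ht⟩ : ∃ h t, split1At c s = h :: t := by
    cases hs : split1At c s with
    | nil => exact absurd hs (split1At_ne_nil c s)
    | cons h t => exact ⟨h, t, rfl⟩
  simp [ht, consPre]

theorem split1At_of_mem (c : Char) : ∀ (s : List Char), c ∈ s →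
    ∃ l d, s = l ++ c :: d ∧ c ∉ l ∧ split1At c s = [l, d] := by
  intro s
  induction s with
  | nil => intro h; simp at h
  | cons x r ih =>
    intro hmem
    by_cases hxc : x = c
    · subst hxc
      exact ⟨[], r, by simp, by simp, by simp [split1At]⟩
    · have hr : c ∈ r := by
        rcases List.mem_cons.mp hmem with h | h
        · exact absurd h.symm hxc
        · exact h
      obtain ⟨l, d, hs, hnl, hsp⟩ := ih hr
      refine ⟨x :: l, d, by simp [hs], ?_, ?_⟩
      · simp [hnl]; exact fun h => absurd h.symm hxc
      · simp [split1At, if_neg hxc, hsp, consPre]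

theorem prefix_at_split (c : Char) : ∀ (q l d : List Char), c ∉ q → c ∉ l →
    ((q ++ [c]) <+: (l ++ c :: d) ↔ q = l) := by
  intro q
  induction q with
  | nil =>
    intro l d _ hnl
    cases l with
    | nil => simp
    | cons x l' =>
      simp only [List.nil_append, List.cons_append]
      constructor
      · intro h
        have := (List.cons_prefix_cons.mp h).1
        exact absurd (this ▸ List.mem_cons_self ..) hnl
      · intro h; simp at h
  | cons a q' ih =>
    intro l d hnq hnl
    cases l with
    | nil =>
      simp only [List.cons_append, List.nil_append]
      constructor
      · intro h
        have := (List.cons_prefix_cons.mp h).1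
        exact absurd (this ▸ List.mem_cons_self ..) hnq
      · intro h; simp at h
    | cons x l' =>
      simp only [List.cons_append, List.cons_prefix_cons, List.cons_eq_cons]
      have hq' : c ∉ q' := fun h => hnq (List.mem_cons_of_mem _ h)
      have hl' : c ∉ l' := fun h => hnl (List.mem_cons_of_mem _ h)
      rw [ih l' d hq' hl']

theorem join_consPre (c : Char) (p : List Char) (L : List (List Char)) (hL : L ≠ []) :
    List.intercalate [c] (consPre p L) = p ++ List.intercalate [c] L := by
  cases L with
  | nil => exact absurd rfl hL
  | cons h t =>
    cases t with
    | nil => simp [consPre, List.intercalate, List.intersperse]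
    | cons y t' => simp [consPre, List.intercalate, List.intersperse]

theorem join_splitAll (c : Char) : ∀ (s : List Char),
    List.intercalate [c] (splitAll c s) = s := by
  intro s
  induction s with
  | nil => simp [splitAll, List.intercalate]
  | cons x r ih =>
    by_cases hxc : x = c
    · subst hxc
      obtain ⟨h, t, ht⟩ : ∃ h t, splitAll x r = h :: t := by
        cases hs : splitAll x r with
        | nil => exact absurd hs (splitAll_ne_nil x r)
        | cons h t => exact ⟨h, t, rfl⟩
      simp only [splitAll, if_true]
      rw [ht] at ih ⊢
      simp [List.intercalate] at ih ⊢
      exact ih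
    · simp only [splitAll, if_neg hxc]
      rw [join_consPre c [x] _ (splitAll_ne_nil c r), ih]
      simp

theorem dotSuffix (c : Char) : ∀ (s t : List Char),
    ((c :: t) <:+ s) ↔ ∃ i, 1 ≤ i ∧ i < (splitAll c s).length ∧
      List.intercalate [c] ((splitAll c s).drop i) = t := by
  intro s
  induction s with
  | nil =>
    intro t
    constructor
    · intro h
      have := h.length_le
      simp at this
    · rintro ⟨i, h1, h2, _⟩
      simp [splitAll] at h2
      omega
  | cons x r ih =>
    intro t
    by_cases hxc : x = c
    · subst hxc
      simp only [splitAll, if_true]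
      rw [List.suffix_cons_iff]
      constructor
      · rintro (h | h)
        · refine ⟨1, le_refl _, ?_, ?_⟩
          · have := splitAll_ne_nil x r
            cases hs : splitAll x r with
            | nil => exact absurd hs this
            | cons a b => simp
          · simp only [List.drop_succ_cons, List.drop_zero]
            rw [join_splitAll]
            exact (List.cons_eq_cons.mp h).2.symm
        · obtain ⟨i, h1, h2, h3⟩ := (ih t).mp h
          exact ⟨i + 1, by omega, by simp only [List.length_cons]; omega, by rw [List.drop_succ_cons]; exact h3⟩
      · rintro ⟨i, h1, h2, h3⟩
        cases i with
        | zero => omega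
        | succ j =>
          cases j with
          | zero =>
            left
            simp only [List.drop_succ_cons, List.drop_zero] at h3
            rw [join_splitAll] at h3
            rw [h3]
          | succ k =>
            right
            refine (ih t).mpr ⟨k + 1, by omega, by simp only [List.length_cons] at h2; omega, by rw [List.drop_succ_cons] at h3; exact h3⟩
    · simp only [splitAll, if_neg hxc]
      obtain ⟨h, t', ht⟩ : ∃ h t', splitAll c r = h :: t' := by
        cases hs : splitAll c r with
        | nil => exact absurd hs (splitAll_ne_nil c r)
        | cons a b => exact ⟨a, b, rfl⟩
      rw [List.suffix_cons_iff]
      have hne : ¬ (c :: t = x :: r) := by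
        intro hh
        exact hxc ((List.cons_eq_cons.mp hh).1.symm)
      have hlen : (consPre [x] (splitAll c r)).length = (splitAll c r).length := by
        rw [ht]; simp [consPre]
      have hdrop : ∀ i, 1 ≤ i → (consPre [x] (splitAll c r)).drop i = (splitAll c r).drop i := by
        intro i hi
        rw [ht]
        cases i with
        | zero => omega
        | succ j => simp [consPre]
      constructor
      · rintro (hh | hh)
        · exact absurd hh hne
        · obtain ⟨i, h1, h2, h3⟩ := (ih t).mp hh
          exact ⟨i, h1, by rw [hlen]; exact h2, by rw [hdrop i h1]; exact h3⟩
      · rintro ⟨i, h1, h2, h3⟩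
        right
        exact (ih t).mpr ⟨i, h1, by rw [hlen] at h2; exact h2,
          by rw [hdrop i h1] at h3; exact h3⟩

theorem suffixJoin_iff (s t : List Char) :
    (s = t ∨ (('.' :: t) <:+ s)) ↔
      ∃ i, i < (splitAll '.' s).length ∧
        List.intercalate ['.'] ((splitAll '.' s).drop i) = t := by
  constructor
  · rintro (h | h)
    · refine ⟨0, ?_, ?_⟩
      · cases hs : splitAll '.' s with
        | nil => exact absurd hs (splitAll_ne_nil '.' s)
        | cons a b => simp
      · simp only [List.drop_zero, join_splitAll]; exact h
    · obtain ⟨i, h1, h2, h3⟩ := (dotSuffix '.' s t).mp h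
      exact ⟨i, h2, h3⟩
  · rintro ⟨i, h2, h3⟩
    cases i with
    | zero =>
      left
      simp only [List.drop_zero, join_splitAll] at h3
      exact h3
    | succ j =>
      right
      exact (dotSuffix '.' s t).mpr ⟨j + 1, by omega, h2, h3⟩

theorem ofList_eq_iff (l : List Char) (p : String) :
    (String.ofList l = p) ↔ l = p.toList := by
  constructor
  · intro h; rw [← h, String.toList_ofList]
  · intro h; rw [h, String.ofList_toList]

theorem join_map_ofList (parts : List (List Char)) :
    PySem.Str.join "." (List.map String.ofList parts) = String.ofList (List.intercalate ['.'] parts) := by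
  simp only [PySem.Str.join, PySem.Chars.join, List.map_map, Function.comp_def,
    String.toList_ofList, List.map_id']
  rfl

theorem endswith_dot_iff (s dm : String) :
    PySem.Str.endswith s ("." ++ dm) = true ↔ ('.' :: dm.toList) <:+ s.toList := by
  rw [show PySem.Str.endswith s ("." ++ dm) = PySem.Chars.endswith s.toList ('.' :: dm.toList) from by
    simp [PySem.Str.endswith, String.toList_append]]
  exact PySem.Chars.endswith_iff _ _

theorem startswith_key (E : String) (l d : List Char) (hnl : '@' ∉ l)
    (hs : E.toList = l ++ '@' :: d) (p loc : String)
    (hp : p.toList = loc.toList ++ ['@']) (hq : '@' ∉ loc.toList) :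
    (PySem.Str.startswith E p = true ↔ String.ofList l = loc) := by
  rw [show PySem.Str.startswith E p = PySem.Chars.startswith E.toList p.toList from rfl,
    PySem.Chars.startswith_iff, hp, hs, prefix_at_split '@' loc.toList l d hq hnl,
    ofList_eq_iff]
  exact ⟨fun h => h.symm, fun h => h.symm⟩

theorem prefix_eq (E : String) (l d : List Char) (hnl : '@' ∉ l)
    (hs : E.toList = l ++ '@' :: d) :
    pvDeadEndEmails.any (fun p => PySem.Str.startswith E p)
      = PySem.Set.contains pvDeadEndLocals (String.ofList l) := by
  rw [Bool.eq_iff_iff]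
  simp only [pvDeadEndEmails, List.any_cons, List.any_nil, Bool.or_eq_true, Bool.or_false]
  rw [startswith_key E l d hnl hs "noreply@" "noreply" rfl (by decide),
    startswith_key E l d hnl hs "no-reply@" "no-reply" rfl (by decide),
    startswith_key E l d hnl hs "donotreply@" "donotreply" rfl (by decide),
    startswith_key E l d hnl hs "do-not-reply@" "do-not-reply" rfl (by decide)]
  rw [show (PySem.Set.contains pvDeadEndLocals (String.ofList l) = true) ↔
      String.ofList l ∈ PySem.Set.ofList ["noreply", "no-reply", "donotreply", "do-not-reply"] from
    PySem.Set.contains_iff .., PySem.Set.mem_ofList]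
  simp only [List.mem_cons, List.not_mem_nil, or_false]

theorem domain_eq (d : List Char) :
    (pvDeadEndDomains.any (fun dm =>
        (String.ofList d == dm) || PySem.Str.endswith (String.ofList d) ("." ++ dm)))
    = ((List.range (List.map String.ofList (splitAll '.' d)).length).any (fun i =>
        PySem.Set.contains pvDeadEndDomains
          (PySem.Str.join "." ((List.map String.ofList (splitAll '.' d)).drop i)))) := by
  rw [Bool.eq_iff_iff]
  have hA : (pvDeadEndDomains.any (fun dm =>
        (String.ofList d == dm) || PySem.Str.endswith (String.ofList d) ("." ++ dm))) = true ↔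
      ∃ dm ∈ pvDeadEndDomainsList, (d = dm.toList ∨ ('.' :: dm.toList) <:+ d) := by
    simp only [pvDeadEndDomains, List.any_eq_true, PySem.Set.mem_ofList, Bool.or_eq_true,
      beq_iff_eq, ofList_eq_iff, endswith_dot_iff, String.toList_ofList]
  have hB : ∀ i, (PySem.Set.contains pvDeadEndDomains
        (PySem.Str.join "." ((List.map String.ofList (splitAll '.' d)).drop i)) = true ↔
      ∃ dm ∈ pvDeadEndDomainsList,
        List.intercalate ['.'] ((splitAll '.' d).drop i) = dm.toList) := by
    intro i
    rw [← List.map_drop, join_map_ofList, PySem.Set.contains_iff, pvDeadEndDomains,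
      PySem.Set.mem_ofList]
    constructor
    · intro h
      exact ⟨_, h, by rw [String.toList_ofList]⟩
    · rintro ⟨dm, hdm, hj⟩
      rw [hj, String.ofList_toList]
      exact hdm
  rw [hA]
  simp only [List.any_eq_true, List.mem_range, List.length_map]
  constructor
  · rintro ⟨dm, hdm, hcond⟩
    obtain ⟨i, hi, hji⟩ := (suffixJoin_iff d dm.toList).mp hcond
    exact ⟨i, hi, (hB i).mpr ⟨dm, hdm, hji⟩⟩
  · rintro ⟨i, hi, hc⟩
    obtain ⟨dm, hdm, hj⟩ := (hB i).mp hc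
    exact ⟨dm, hdm, (suffixJoin_iff d dm.toList).mpr ⟨i, hi, hj⟩⟩

-- ===== VERDICT (by name: the statement is the Claim_ definition above) =====
theorem is_dead_end_email_py_spec : Claim_equal_is_dead_end_email_py := by
  intro email _
  unfold Spec_is_dead_end_email_py is_dead_end_email_py is_dead_end_email_py_alt
  set E := PySem.Str.lower (PySem.Str.strip (email.getD "")) with hE
  by_cases hg : (E == "" || !PySem.Str.isIn "@" E) = true
  · rw [if_pos hg, if_pos hg]
  · rw [if_neg hg, if_neg hg]
    have hIn : PySem.Str.isIn "@" E = true := by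
      cases h : PySem.Str.isIn "@" E
      · exact absurd (by rw [h]; simp) hg
      · rfl
    have hmem : '@' ∈ E.toList := by
      have := (PySem.Str.isIn_iff_infix "@" E).mp hIn
      simpa [List.singleton_infix_iff] using this
    obtain ⟨l, d, hs, hnl, hsp⟩ := split1At_of_mem '@' E.toList hmem
    have hsplit : PySem.Str.splitMax? E "@" 1 = some [String.ofList l, String.ofList d] := by
      rw [show PySem.Str.splitMax? E "@" 1
          = Option.map (List.map String.ofList) (PySem.Chars.splitMax? E.toList ['@'] 1) from rfl]
      rw [show PySem.Chars.splitMax? E.toList ['@'] 1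
          = some (PySem.Chars.splitOnMax E.toList ['@'] 1) from by
        simp [PySem.Chars.splitMax?]]
      rw [splitOnMax1_single, hsp]
      rfl
    have hsplitd : PySem.Str.split? (String.ofList d) "."
        = some (List.map String.ofList (splitAll '.' d)) := by
      rw [show PySem.Str.split? (String.ofList d) "."
          = Option.map (List.map String.ofList) (PySem.Chars.split? d ['.']) from by
        simp [PySem.Str.split?]]
      rw [show PySem.Chars.split? d ['.'] = some (PySem.Chars.splitOn d ['.']) from by
        simp [PySem.Chars.split?]]
      rw [splitOn_single]
      rfl
    rw [hsplit]
    rw [show (some [String.ofList l, String.ofList d]).bind (fun parts => PySem.List.pyGet? parts 1)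
        = some (String.ofList d) from by simp [PySem.List.pyGet?, PySem.List.pyIdx?]]
    simp only []
    rw [prefix_eq E l d hnl hs]
    cases hc : PySem.Set.contains pvDeadEndLocals (String.ofList l)
    · simp only [Bool.false_eq_true, if_false]
      rw [hsplitd]
      simp only []
      rw [← domain_eq d]
      cases hd : (pvDeadEndDomains.any (fun dm =>
          (String.ofList d == dm) || PySem.Str.endswith (String.ofList d) ("." ++ dm))) <;> simp
    · simp
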